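-- pv_equiv track=rewrite | github.com/lordofmetis/helsinki | part04-37_neighbours_in_list/src/neighbours_in_list.py | longest_series_of_neighbours
-- ===== SOURCE A (Python) =====
-- def longest_series_of_neighbours(numbers):
--     longest_series = 0
--     current_series = 0
--
--     for i in range(len(numbers) - 1):
--         if abs(numbers[i] - numbers[i + 1]) == 1:
--             current_series += 1
--             longest_series = max(longest_series, current_series)
--         else:
--             current_series = 0
--
--     return longest_series + 1 if longest_series > 0 else 0
-- ===== SOURCE B (Python) =====
-- def longest_series_of_neighbours(numbers):
--     # Two passes: build the adjacency booleans, then split them into maximal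
--     # runs of True and take the longest run.
--     adj = [abs(a - b) == 1 for a, b in zip(numbers, numbers[1:])]
--     runs = []
--     i = 0
--     n = len(adj)
--     while i < n:
--         if adj[i]:
--             k = i + 1
--             while k < n and adj[k]:
--                 k += 1
--             runs.append(k - i)
--             i = k
--         else:
--             i += 1
--     best = max(runs, default=0)
--     return best + 1 if best > 0 else 0
-- ===== Notes on version B (the rewrite author's own statement) =====
-- stated objective: alternative
-- what changed: A fuses edge-testing and run-tracking into one indexed loop with two counters; B first builds the adjacency boolean list from zip(numbers, numbers[1:]), then splits it into the lengths of its maximal True-runs and takes the maximum with max(runs, default=0).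
import Mathlib
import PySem

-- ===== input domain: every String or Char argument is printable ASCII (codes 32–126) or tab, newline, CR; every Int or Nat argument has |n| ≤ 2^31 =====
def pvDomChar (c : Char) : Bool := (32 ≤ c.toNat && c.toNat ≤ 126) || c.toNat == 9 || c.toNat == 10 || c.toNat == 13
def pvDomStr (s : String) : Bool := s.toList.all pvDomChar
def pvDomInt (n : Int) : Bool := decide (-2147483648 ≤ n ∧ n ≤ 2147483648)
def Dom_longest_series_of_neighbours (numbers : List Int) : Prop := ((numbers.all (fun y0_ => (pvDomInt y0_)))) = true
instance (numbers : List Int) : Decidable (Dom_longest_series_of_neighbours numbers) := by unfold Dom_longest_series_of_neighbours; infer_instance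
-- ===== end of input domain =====

-- B re-decomposes A's fused edge-counting loop into two passes: build the adjacency
-- booleans, split them into maximal runs of True, and take the longest run ('alternative', same cost).

-- ===== PORT A =====
-- literal port of A's index loop; i and i+1 are always in range, so pyGetD's default is never read
def longest_series_of_neighbours (numbers : List Int) : Int :=
  let r :=
    (PySem.List.pyRange 0 ((numbers.length : Int) - 1)).foldl
      (fun (st : Int × Int) i =>
        if (PySem.List.pyGetD numbers i 0 - PySem.List.pyGetD numbers (i + 1) 0).natAbs = 1 then
          (max st.1 (st.2 + 1), st.2 + 1)
        else
          (st.1, 0))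
      (0, 0)
  if r.1 > 0 then r.1 + 1 else 0

-- ===== PORT B =====
-- inner while loop of B: first index ≥ k that is out of range or holds False
def pvScanTrue (adj : List Bool) (n k : Nat) : Nat :=
  if k < n ∧ adj.getD k false then pvScanTrue adj n (k + 1) else k
  termination_by n - k
  decreasing_by omega

theorem pvScanTrue_ge (adj : List Bool) (n k : Nat) : k ≤ pvScanTrue adj n k := by
  induction k using pvScanTrue.induct adj n with
  | case1 k h ih => rw [pvScanTrue, if_pos h]; omega
  | case2 k h => rw [pvScanTrue, if_neg h]

-- outer while loop of B: collect the lengths of the maximal True-runs of adj[i:]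
def pvCollectRuns (adj : List Bool) (n i : Nat) : List Int :=
  if h : i < n then
    if adj.getD i false then
      -- k := the inner scan's stopping point
      ((pvScanTrue adj n (i + 1) : Int) - (i : Int)) :: pvCollectRuns adj n (pvScanTrue adj n (i + 1))
    else
      pvCollectRuns adj n (i + 1)
  else
    []
  termination_by n - i
  decreasing_by
  · have := pvScanTrue_ge adj n (i + 1); omega
  · omega

def longest_series_of_neighbours_alt (numbers : List Int) : Int :=
  let adj := (numbers.zip (PySem.List.slice numbers (some 1) none)).map
      (fun p => decide ((p.1 - p.2).natAbs = 1))
  let runs := pvCollectRuns adj adj.length 0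
  let best := PySem.List.maxD runs (fun x => x) 0
  if best > 0 then best + 1 else 0

-- ===== PRECONDITION & SPEC =====
def Spec_longest_series_of_neighbours (numbers : List Int) (out : Int) : Prop := out = longest_series_of_neighbours_alt numbers
instance (numbers : List Int) (out : Int) : Decidable (Spec_longest_series_of_neighbours numbers out) := by unfold Spec_longest_series_of_neighbours; infer_instance

-- ===== CLAIM (what is proved, stated in full; the proofs are below) =====
def Claim_equal_longest_series_of_neighbours : Prop := ∀ (numbers : List Int), Dom_longest_series_of_neighbours numbers → Spec_longest_series_of_neighbours numbers (longest_series_of_neighbours numbers)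

-- ===== LEMMAS AND PROOFS =====

-- proof-side recharacterisation of B's loops: run lengths by structural recursion
def pvLeadTrue : List Bool → Nat
  | [] => 0
  | true :: t => pvLeadTrue t + 1
  | false :: _ => 0

def pvRuns : List Bool → List Int
  | [] => []
  | false :: t => pvRuns t
  | true :: t => ((pvLeadTrue t : Int) + 1) :: pvRuns (t.dropWhile (fun b => b))
  termination_by l => l.length
  decreasing_by
  · simp
  · have h := List.length_dropWhile_le (fun b => b) t
    simp; omega

theorem pvLead_dropWhile (t : List Bool) : t.dropWhile (fun b => b) = t.drop (pvLeadTrue t) := by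
  induction t with
  | nil => simp
  | cons b t ih => cases b <;> simp [pvLeadTrue, List.dropWhile, ih]

theorem pvScanTrue_eq (adj : List Bool) (k : Nat) :
    pvScanTrue adj adj.length k = k + pvLeadTrue (adj.drop k) := by
  induction k using pvScanTrue.induct adj adj.length with
  | case1 k h ih =>
    rw [pvScanTrue, if_pos h]
    obtain ⟨hk, hv⟩ := h
    have hd : adj.drop k = adj[k] :: adj.drop (k + 1) := List.drop_eq_getElem_cons hk
    rw [List.getD_eq_getElem _ _ hk] at hv
    rw [hd, hv, pvLeadTrue, ih]
    omega
  | case2 k h =>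
    rw [pvScanTrue, if_neg h]
    rcases Decidable.not_and_iff_or_not.mp h with h1 | h1
    · rw [List.drop_eq_nil_of_le (by omega)]; simp [pvLeadTrue]
    · by_cases hk : k < adj.length
      · have hd : adj.drop k = adj[k] :: adj.drop (k + 1) := List.drop_eq_getElem_cons hk
        rw [List.getD_eq_getElem _ _ hk] at h1
        simp only [Bool.not_eq_true] at h1
        rw [hd, h1, pvLeadTrue]
        omega
      · rw [List.drop_eq_nil_of_le (by omega)]; simp [pvLeadTrue]


theorem pvCollectRuns_eq (adj : List Bool) (i : Nat) :
    pvCollectRuns adj adj.length i = pvRuns (adj.drop i) := by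
  induction i using pvCollectRuns.induct adj adj.length with
  | case1 i hi hv ih =>
    rw [pvCollectRuns, dif_pos hi, if_pos hv]
    have hd : adj.drop i = adj[i] :: adj.drop (i + 1) := List.drop_eq_getElem_cons hi
    rw [List.getD_eq_getElem _ _ hi] at hv
    rw [hd, hv, pvRuns]
    have hs := pvScanTrue_eq adj (i + 1)
    simp only [List.cons.injEq]
    refine ⟨by rw [hs]; push_cast; ring, ?_⟩
    rw [ih, pvLead_dropWhile, List.drop_drop, hs]
  | case2 i hi hv ih =>
    rw [pvCollectRuns, dif_pos hi, if_neg hv]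
    have hd : adj.drop i = adj[i] :: adj.drop (i + 1) := List.drop_eq_getElem_cons hi
    rw [List.getD_eq_getElem _ _ hi] at hv
    simp only [Bool.not_eq_true] at hv
    rw [hd, hv, pvRuns, ih]
  | case3 i hi =>
    rw [pvCollectRuns, dif_neg hi]
    rw [List.drop_eq_nil_of_le (by omega)]
    simp [pvRuns]

-- the maximum, over all positions of adj, of the (c-extended) length of the True-run ending there
def pvMaxEnd : Int → List Bool → Int
  | _, [] => 0
  | c, true :: t => max (c + 1) (pvMaxEnd (c + 1) t)
  | _, false :: t => pvMaxEnd 0 t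

-- length of the trailing True-run, extended by the carry c
def pvTrail : Int → List Bool → Int
  | c, [] => c
  | c, true :: t => pvTrail (c + 1) t
  | _, false :: t => pvTrail 0 t

theorem pvMaxEnd_nonneg (adj : List Bool) (c : Int) (hc : 0 ≤ c) : 0 ≤ pvMaxEnd c adj := by
  induction adj generalizing c with
  | nil => simp [pvMaxEnd]
  | cons b t ih =>
    cases b <;> simp [pvMaxEnd]
    · exact ih 0 le_rfl
    · left; omega

-- A's loop body, folded over the adjacency booleans, computes (max L (pvMaxEnd c adj), pvTrail c adj)
theorem pvFoldA (adj : List Bool) (L c : Int) (hL : 0 ≤ L) (hc : 0 ≤ c) :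
    adj.foldl (fun (st : Int × Int) b => if b then (max st.1 (st.2 + 1), st.2 + 1) else (st.1, 0)) (L, c)
      = (max L (pvMaxEnd c adj), pvTrail c adj) := by
  induction adj generalizing L c with
  | nil => simp [pvMaxEnd, pvTrail]; omega
  | cons b t ih =>
    cases b
    · simpa [pvMaxEnd, pvTrail] using ih L 0 hL le_rfl
    · simp only [List.foldl_cons, pvMaxEnd, pvTrail, if_pos trivial]
      rw [ih (max L (c + 1)) (c + 1) (by omega) (by omega)]
      simp only [Prod.mk.injEq]
      exact ⟨by omega, trivial⟩

theorem pvLead_split (t : List Bool) (c : Int) (hc : 0 ≤ c) :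
    max c (pvMaxEnd c t) = max (c + (pvLeadTrue t : Int)) (pvMaxEnd 0 (t.dropWhile (fun b => b))) := by
  induction t generalizing c with
  | nil => simp [pvMaxEnd, pvLeadTrue]
  | cons b t ih =>
    cases b
    · simp [pvMaxEnd, pvLeadTrue, List.dropWhile]
    · simp only [pvMaxEnd, pvLeadTrue, List.dropWhile]
      have h := ih (c + 1) (by omega)
      push_cast
      push_cast at h
      omega

theorem pvFoldlMax (l : List Int) (a : Int) (ha : 0 ≤ a) :
    l.foldl max a = max a (l.foldl max 0) := by
  induction l generalizing a with
  | nil => simp; omega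
  | cons x t ih =>
    simp only [List.foldl_cons]
    rw [ih (max a x) (by omega), ih (max 0 x) (by omega)]
    omega

theorem pvRuns_maxEnd (adj : List Bool) :
    (pvRuns adj).foldl max (0 : Int) = pvMaxEnd 0 adj := by
  induction adj using pvRuns.induct with
  | case1 => simp [pvRuns, pvMaxEnd]
  | case2 t ih => simpa [pvRuns, pvMaxEnd] using ih
  | case3 t ih =>
    simp only [pvRuns, List.foldl_cons]
    rw [pvFoldlMax _ _ (by omega), ih]
    have h := pvLead_split t 1 (by omega)
    simp only [pvMaxEnd, zero_add]
    omega

theorem pvRuns_pos (adj : List Bool) : ∀ x ∈ pvRuns adj, 0 ≤ x := by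
  induction adj using pvRuns.induct with
  | case1 => simp [pvRuns]
  | case2 t ih => simpa [pvRuns] using ih
  | case3 t ih =>
    intro x hx
    simp only [pvRuns, List.mem_cons] at hx
    rcases hx with h | h
    · omega
    · exact ih x h

theorem pvMaxD_eq_foldl (l : List Int) (h : ∀ x ∈ l, 0 ≤ x) :
    PySem.List.maxD l (fun x => x) 0 = l.foldl max (0 : Int) := by
  cases l with
  | nil => simp [PySem.List.maxD, PySem.List.max?]
  | cons x t =>
    simp only [PySem.List.maxD, PySem.List.max?_id_cons, Option.getD_some, List.foldl_cons]
    rw [max_eq_right (h x (by simp))]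

-- the index→pair bridge: reading numbers[i], numbers[i+1] over range(len-1) is zip(numbers, numbers[1:])
theorem pvPairs (xs : List Int) :
    (PySem.List.pyRange 0 ((xs.length : Int) - 1)).map
        (fun i => (PySem.List.pyGetD xs i 0, PySem.List.pyGetD xs (i + 1) 0))
      = xs.zip xs.tail := by
  apply List.ext_getElem
  · simp [PySem.List.length_pyRange_one]
  · intro k h1 h2
    have hk : k < xs.length - 1 := by
      simp [PySem.List.length_pyRange_one] at h1; omega
    simp only [List.getElem_map, PySem.List.getElem_pyRange_one, List.getElem_zip]
    have e0 : (0 : Int) + (k : Int) = ((k : Nat) : Int) := by omega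
    rw [e0]
    have e1 : ((k : Nat) : Int) + 1 = (((k + 1 : Nat)) : Int) := by push_cast; ring
    rw [e1, PySem.List.pyGetD_natCast, PySem.List.pyGetD_natCast]
    rw [List.getD_eq_getElem _ _ (by omega : k < xs.length),
        List.getD_eq_getElem _ _ (by omega : k + 1 < xs.length)]
    simp [List.getElem_tail]

-- ===== VERDICT (by name: the statement is the Claim_ definition above) =====
theorem longest_series_of_neighbours_spec : Claim_equal_longest_series_of_neighbours := by
  intro numbers _
  unfold Spec_longest_series_of_neighbours longest_series_of_neighbours longest_series_of_neighbours_alt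
  simp only [PySem.List.slice_from_one]
  have hA : (PySem.List.pyRange 0 ((numbers.length : Int) - 1)).foldl
      (fun (st : Int × Int) i =>
        if (PySem.List.pyGetD numbers i 0 - PySem.List.pyGetD numbers (i + 1) 0).natAbs = 1 then
          (max st.1 (st.2 + 1), st.2 + 1)
        else (st.1, 0)) (0, 0)
      = (numbers.zip numbers.tail).foldl
          (fun (st : Int × Int) p => if (p.1 - p.2).natAbs = 1 then (max st.1 (st.2 + 1), st.2 + 1) else (st.1, 0))
          (0, 0) := by
    rw [← pvPairs numbers, List.foldl_map]
  have hB : ((numbers.zip numbers.tail).map (fun p => decide ((p.1 - p.2).natAbs = 1))).foldl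
      (fun (st : Int × Int) b => if b then (max st.1 (st.2 + 1), st.2 + 1) else (st.1, 0)) (0, 0)
      = (numbers.zip numbers.tail).foldl
          (fun (st : Int × Int) p => if (p.1 - p.2).natAbs = 1 then (max st.1 (st.2 + 1), st.2 + 1) else (st.1, 0))
          (0, 0) := by
    rw [List.foldl_map]
    apply PySem.List.foldl_congr_mem
    intro acc x _
    simp
  rw [hA, ← hB, pvFoldA _ 0 0 le_rfl le_rfl, pvCollectRuns_eq, List.drop_zero,
      pvMaxD_eq_foldl _ (pvRuns_pos _), pvRuns_maxEnd]
  have hM := pvMaxEnd_nonneg ((numbers.zip numbers.tail).map (fun p => decide ((p.1 - p.2).natAbs = 1))) 0 le_rfl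
  simp only [max_eq_right hM]
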